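-- pv_equiv track=rewrite | github.com/markyangliu/QuadraticSieve | quadratic_sieve.py | verify_candidates
-- ===== SOURCE A (Python) =====
-- def verify_candidates(factor_base, smooth_cands, x_list):
--     '''
--     Use trial division to verify that candidates are B-smooth.
--     '''
--     valid_nums = []
--     valid_x = []
--     for num, x in zip(smooth_cands, x_list):
--         div = abs(num)
--         for p in factor_base:
--             while(div % p == 0):
--                 div = div // p
--         if div == 1:
--             valid_nums.append(num)
--             valid_x.append(x)
--         #if len(valid_nums) > len(factor_base) + 10:
--         #  return valid_nums
--     return valid_nums, valid_x
-- ===== SOURCE B (Python) =====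
-- def _strip(d, p):
--     if d % p == 0:
--         return _strip(d // p, p)
--     return d
--
-- def verify_candidates(factor_base, smooth_cands, x_list):
--     pairs = list(zip(smooth_cands, x_list))
--     nums = [n for n, _ in pairs]
--     xs = [x for _, x in pairs]
--     divs = [abs(n) for n in nums]
--     for p in factor_base:
--         divs = [_strip(d, p) for d in divs]
--     valid_nums = [n for n, d in zip(nums, divs) if d == 1]
--     valid_x = [x for x, d in zip(xs, divs) if d == 1]
--     return valid_nums, valid_x
-- ===== Notes on version B (the rewrite author's own statement) =====
-- stated objective: alternative
-- what changed: B interchanges the loops: it sieves the whole candidate vector one factor-base element at a time (rebuilding the vector of reduced values per prime) and collects the valid nums/xs with end-of-pass filters, instead of A's candidate-major loop with per-candidate trial division and in-loop appends; the power-stripping step is recursive instead of a while loop.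
import Mathlib
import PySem

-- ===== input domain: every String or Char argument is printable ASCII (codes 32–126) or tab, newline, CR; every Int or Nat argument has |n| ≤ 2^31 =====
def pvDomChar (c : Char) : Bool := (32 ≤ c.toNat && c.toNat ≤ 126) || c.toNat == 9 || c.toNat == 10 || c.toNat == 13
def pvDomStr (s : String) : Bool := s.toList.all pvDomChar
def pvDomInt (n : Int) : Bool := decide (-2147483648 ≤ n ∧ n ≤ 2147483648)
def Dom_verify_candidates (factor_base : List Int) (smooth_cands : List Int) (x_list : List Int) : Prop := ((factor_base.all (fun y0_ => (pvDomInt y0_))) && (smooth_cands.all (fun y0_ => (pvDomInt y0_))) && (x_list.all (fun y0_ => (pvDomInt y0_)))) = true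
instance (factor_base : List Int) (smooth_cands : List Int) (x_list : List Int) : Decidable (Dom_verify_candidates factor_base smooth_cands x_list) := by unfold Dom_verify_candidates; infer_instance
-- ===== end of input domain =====

-- B interchanges the two loops: it sieves the whole candidate vector one factor-base
-- element at a time and filters at the end, instead of A's per-candidate trial division
-- with in-loop appends (objective: alternative, same asymptotic cost).

-- ===== PORT A =====
-- shared helper: Python's `while div % p == 0: div = div // p` (A) / recursive `_strip` (B).
-- Fuel `d.natAbs + 1` bounds the iteration count wherever the Python loop terminates
-- (each division shrinks |d| by a factor ≥ 2 on inputs admitted by Pre_).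
def pyStripFactor (fuel : Nat) (d p : Int) : Int :=
  match fuel with
  | 0 => d
  | fuel + 1 =>
      if PySem.Int.mod d p = 0 then pyStripFactor fuel (PySem.Int.floordiv d p) p else d

def verify_candidates (factor_base : List Int) (smooth_cands : List Int) (x_list : List Int) : List Int × List Int :=
  (smooth_cands.zip x_list).foldl
    (fun acc nx =>
      let div := factor_base.foldl (fun d p => pyStripFactor (d.natAbs + 1) d p) |nx.1|
      if div = 1 then (acc.1 ++ [nx.1], acc.2 ++ [nx.2]) else acc)
    ([], [])

-- ===== PORT B =====
def verify_candidates_alt (factor_base : List Int) (smooth_cands : List Int) (x_list : List Int) : List Int × List Int :=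
  let pairs := smooth_cands.zip x_list
  let nums := pairs.map Prod.fst
  let xs := pairs.map Prod.snd
  let divs0 := nums.map (fun n => |n|)
  let divs := factor_base.foldl (fun ds p => ds.map (fun d => pyStripFactor (d.natAbs + 1) d p)) divs0
  ((nums.zip divs).filterMap (fun nd => if nd.2 = 1 then some nd.1 else none),
   (xs.zip divs).filterMap (fun xd => if xd.2 = 1 then some xd.1 else none))

-- ===== PRECONDITION & SPEC =====
-- Pre_ is exactly the set of inputs on which the Python A returns: it excludes only
-- inputs where A raises ZeroDivisionError (0 in factor_base with a processed candidate)
-- or loops forever (±1 in factor_base, or a candidate 0 with a nonempty factor base).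
def Pre_verify_candidates (factor_base : List Int) (smooth_cands : List Int) (x_list : List Int) : Prop :=
  smooth_cands.zip x_list = [] ∨
    ((0 : Int) ∉ factor_base ∧ (1 : Int) ∉ factor_base ∧ (-1 : Int) ∉ factor_base ∧
      (factor_base = [] ∨ ∀ nx ∈ smooth_cands.zip x_list, nx.1 ≠ 0))
instance (factor_base : List Int) (smooth_cands : List Int) (x_list : List Int) : Decidable (Pre_verify_candidates factor_base smooth_cands x_list) := by unfold Pre_verify_candidates; infer_instance

def pvWitness_verify_candidates : List Int × List Int × List Int := ([2, 3], [12, 7, -5], [0, 1, 2])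

def Spec_verify_candidates (factor_base : List Int) (smooth_cands : List Int) (x_list : List Int) (out : List Int × List Int) : Prop := out = verify_candidates_alt factor_base smooth_cands x_list
instance (factor_base : List Int) (smooth_cands : List Int) (x_list : List Int) (out : List Int × List Int) : Decidable (Spec_verify_candidates factor_base smooth_cands x_list out) := by unfold Spec_verify_candidates; infer_instance

-- ===== CLAIM (what is proved, stated in full; the proofs are below) =====
def Claim_equal_verify_candidates : Prop := ∀ (factor_base : List Int) (smooth_cands : List Int) (x_list : List Int), Dom_verify_candidates factor_base smooth_cands x_list → Pre_verify_candidates factor_base smooth_cands x_list → Spec_verify_candidates factor_base smooth_cands x_list (verify_candidates factor_base smooth_cands x_list)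

-- ===== LEMMAS AND PROOFS =====

-- full reduction of one candidate by the whole factor base (proof abbreviation)
def pvRed (factor_base : List Int) (d : Int) : Int :=
  factor_base.foldl (fun d p => pyStripFactor (d.natAbs + 1) d p) d

-- loop interchange: folding the per-prime map over the vector = mapping the per-element fold
theorem pvInterchange (factor_base : List Int) (ds : List Int) :
    factor_base.foldl (fun ds p => ds.map (fun d => pyStripFactor (d.natAbs + 1) d p)) ds
      = ds.map (pvRed factor_base) := by
  induction factor_base generalizing ds with
  | nil => simp [show pvRed ([] : List Int) = fun d => d from rfl]
  | cons p fb ih =>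
      simp only [List.foldl_cons, ih, List.map_map]
      rfl

-- A's accumulator fold = accumulators ++ B's end filters, over the zipped pair list
theorem pvMain (factor_base : List Int) (pairs : List (Int × Int)) (acc1 acc2 : List Int) :
    pairs.foldl
      (fun acc nx =>
        let div := factor_base.foldl (fun d p => pyStripFactor (d.natAbs + 1) d p) |nx.1|
        if div = 1 then (acc.1 ++ [nx.1], acc.2 ++ [nx.2]) else acc)
      (acc1, acc2)
    = (acc1 ++ ((pairs.map Prod.fst).zip ((pairs.map Prod.fst).map (fun n => pvRed factor_base |n|))).filterMap
          (fun nd => if nd.2 = 1 then some nd.1 else none),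
       acc2 ++ ((pairs.map Prod.snd).zip ((pairs.map Prod.fst).map (fun n => pvRed factor_base |n|))).filterMap
          (fun xd => if xd.2 = 1 then some xd.1 else none)) := by
  induction pairs generalizing acc1 acc2 with
  | nil => simp
  | cons nx rest ih =>
      simp only [List.foldl_cons, List.map_cons, List.zip_cons_cons, List.filterMap_cons]
      by_cases h : pvRed factor_base |nx.1| = 1
      · have : factor_base.foldl (fun d p => pyStripFactor (d.natAbs + 1) d p) |nx.1| = 1 := h
        simp [this, h, ih, List.append_assoc]
      · have : factor_base.foldl (fun d p => pyStripFactor (d.natAbs + 1) d p) |nx.1| ≠ 1 := h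
        simp [this, h, ih]

-- ===== VERDICT (by name: the statement is the Claim_ definition above) =====
theorem verify_candidates_spec : Claim_equal_verify_candidates := by
  intro factor_base smooth_cands x_list _ _
  unfold Spec_verify_candidates verify_candidates verify_candidates_alt
  simp only [pvInterchange, List.map_map]
  rw [pvMain]
  simp only [List.nil_append, List.map_map, Function.comp_def]
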